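-- pv_equiv track=rewrite | github.com/pypi-data/pypi-mirror-80 | packages/valkyrie-util/valkyrie_util-2.3.3.tar.gz/valkyrie_util-2.3.3/valkyrie_util/large.py | __carry_values
-- ===== SOURCE A (Python) =====
-- from typing import List
--
-- def __carry_values(large_num: List[int], base: int = 10) -> List[int]:
--     '''ensures that all values in the large number are less than the base by carrying the remainder to next value'''
--     result, magnitude, remainder = [], 0, 0
--     while remainder > 0 or magnitude < len(large_num):
--         if magnitude < len(large_num):
--             remainder += large_num[magnitude]
--         result.append(remainder % base)
--         remainder = remainder // base
--         magnitude += 1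
--     return result
-- ===== SOURCE B (Python) =====
-- from typing import List
--
-- def __carry_values(large_num: List[int], base: int = 10) -> List[int]:
--     '''ensures that all values in the large number are less than the base by carrying the remainder to next value'''
--     # Reconstruct the whole value the digit list denotes (Horner from the most
--     # significant end), then read its digits back off by repeated division,
--     # always emitting at least len(large_num) digits.
--     n = 0
--     for d in reversed(large_num):
--         n = n * base + d
--     result = []
--     for _ in large_num:
--         result.append(n % base)
--         n //= base
--     while n > 0:
--         result.append(n % base)
--         n //= base
--     return result
-- ===== Notes on version B (the rewrite author's own statement) =====
-- stated objective: alternative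
-- what changed: Instead of A's local carry propagation (one fused while loop indexing by a magnitude counter that adds each digit to a running remainder), B first collapses the whole list into the single integer it denotes via a Horner evaluation over the reversed list, then regenerates the digits of that integer by repeated divmod, emitting at least len(large_num) digits; no carry is ever propagated between digit positions.
import Mathlib
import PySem

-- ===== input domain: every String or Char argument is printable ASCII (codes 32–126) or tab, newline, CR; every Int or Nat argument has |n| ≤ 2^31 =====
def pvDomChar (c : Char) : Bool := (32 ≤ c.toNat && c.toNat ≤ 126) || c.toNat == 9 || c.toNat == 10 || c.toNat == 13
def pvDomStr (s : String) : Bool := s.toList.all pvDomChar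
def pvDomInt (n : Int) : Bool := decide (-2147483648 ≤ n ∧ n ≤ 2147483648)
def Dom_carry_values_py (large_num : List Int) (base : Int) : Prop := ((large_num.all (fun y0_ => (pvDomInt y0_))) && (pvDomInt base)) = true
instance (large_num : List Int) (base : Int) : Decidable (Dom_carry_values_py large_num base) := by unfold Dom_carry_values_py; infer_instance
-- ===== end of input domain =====

-- B replaces A's digit-by-digit carry propagation by a different algorithm: collapse the list
-- into the single integer it denotes (Horner over the reversed list), then regenerate that
-- integer's digits by repeated divmod; same output, no carry threaded between positions.

-- ===== PORT A =====
-- A's while loop: one iteration per step; the fuel argument only makes the recursion total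
-- (within Dom ∧ Pre_ the loop performs fewer than 2*len+64 iterations, so fuel never binds).
def carryLoopA (large_num : List Int) (base : Int) : Nat → Nat → Int → List Int
  | 0, _, _ => []
  | fuel+1, magnitude, remainder =>
    if remainder > 0 ∨ magnitude < large_num.length then
      -- `large_num[magnitude]` is read only under the guard `magnitude < len`, so getD is exact
      let r := if magnitude < large_num.length then remainder + large_num.getD magnitude 0 else remainder
      PySem.Int.mod r base :: carryLoopA large_num base fuel (magnitude + 1) (PySem.Int.floordiv r base)
    else []

def carry_values_py (large_num : List Int) (base : Int) : List Int :=
  carryLoopA large_num base (2 * large_num.length + 64) 0 0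

-- ===== PORT B =====
-- B's Horner phase: `n = 0; for d in reversed(large_num): n = n * base + d`
def hornerB (base : Int) (large_num : List Int) : Int :=
  large_num.reverse.foldl (fun n d => n * base + d) 0

-- B's `for _ in large_num:` extraction phase: returns (appended digits, final n)
def extractB (base : Int) : List Int → Int → List Int × Int
  | [], n => ([], n)
  | _ :: ds, n =>
    let (rest, nf) := extractB base ds (PySem.Int.floordiv n base)
    (PySem.Int.mod n base :: rest, nf)

-- B's trailing `while n > 0` loop; fuel is only a totality guard (never binds on Dom ∧ Pre_)
def carryTailB (base : Int) : Nat → Int → List Int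
  | 0, _ => []
  | fuel+1, r =>
    if r > 0 then PySem.Int.mod r base :: carryTailB base fuel (PySem.Int.floordiv r base)
    else []

def carry_values_py_alt (large_num : List Int) (base : Int) : List Int :=
  let n := hornerB base large_num
  let (res, r) := extractB base large_num n
  res ++ carryTailB base (large_num.length + 64) r

-- ===== PRECONDITION & SPEC =====
-- Pre_ excludes base 0 with a nonempty list, where A raises ZeroDivisionError, and base 1 with
-- positive digit sum, where A's while loop never terminates; on all other inputs A returns.
def Pre_carry_values_py (large_num : List Int) (base : Int) : Prop :=
  (large_num ≠ [] → base ≠ 0) ∧ (base = 1 → large_num.sum ≤ 0)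
instance (large_num : List Int) (base : Int) : Decidable (Pre_carry_values_py large_num base) := by unfold Pre_carry_values_py; infer_instance

def pvWitness_carry_values_py : List Int × Int := ([3, 14, 275], 10)

def Spec_carry_values_py (large_num : List Int) (base : Int) (out : List Int) : Prop := out = carry_values_py_alt large_num base
instance (large_num : List Int) (base : Int) (out : List Int) : Decidable (Spec_carry_values_py large_num base out) := by unfold Spec_carry_values_py; infer_instance

-- ===== CLAIM (what is proved, stated in full; the proofs are below) =====
def Claim_equal_carry_values_py : Prop := ∀ (large_num : List Int) (base : Int), Dom_carry_values_py large_num base → Pre_carry_values_py large_num base → Spec_carry_values_py large_num base (carry_values_py large_num base)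

-- ===== LEMMAS AND PROOFS =====

-- abbreviation used by the proofs: the value the digit list ds denotes
def hornerR (base : Int) (ds : List Int) : Int := ds.foldr (fun d n => n * base + d) 0

theorem hornerB_eq (base : Int) (l : List Int) : hornerB base l = hornerR base l := by
  simp [hornerB, hornerR, List.foldl_reverse]

-- once magnitude has passed the end of the list, A's loop is exactly B's tail loop
theorem carryLoopA_tail (large_num : List Int) (base : Int) :
    ∀ (fuel magnitude : Nat) (r : Int), large_num.length ≤ magnitude →
      carryLoopA large_num base fuel magnitude r = carryTailB base fuel r := by
  intro fuel
  induction fuel with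
  | zero => intro _ _ _; rfl
  | succ f ih =>
    intro magnitude r h
    simp only [carryLoopA, carryTailB]
    have hlt : ¬ magnitude < large_num.length := by omega
    simp only [hlt, if_false, or_false]
    split
    · exact congrArg _ (ih (magnitude + 1) _ (by omega))
    · rfl

-- A's carry loop over the still-unprocessed suffix ds with pending remainder r equals B's
-- extraction of the digits of the single integer r + value(ds), followed by B's tail loop
theorem carryLoopA_main (large_num : List Int) (base : Int) (hb : base ≠ 0) (g : Nat) :
    ∀ (ds : List Int) (magnitude : Nat) (r : Int),
      large_num.drop magnitude = ds → magnitude + ds.length = large_num.length →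
      carryLoopA large_num base (ds.length + g) magnitude r =
        (extractB base ds (r + hornerR base ds)).1 ++
          carryTailB base g (extractB base ds (r + hornerR base ds)).2 := by
  intro ds
  induction ds with
  | nil =>
    intro magnitude r _ hlen
    simp only [List.length_nil, Nat.add_zero] at hlen
    simpa [extractB, hornerR] using carryLoopA_tail large_num base g magnitude r (by omega)
  | cons d ds ih =>
    intro magnitude r hdrop hlen
    have hlt : magnitude < large_num.length := by simp at hlen; omega
    have hget : large_num.getD magnitude 0 = d := by
      have h1 : large_num[magnitude]? = some d := by
        have h2 : (large_num.drop magnitude).head? = large_num[magnitude]? := List.head?_drop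
        rw [hdrop] at h2
        exact h2.symm
      simp [List.getD_eq_getElem?_getD, h1]
    have hdrop' : large_num.drop (magnitude + 1) = ds := by
      have : (large_num.drop magnitude).drop 1 = ds := by rw [hdrop]; rfl
      simpa [List.drop_drop, Nat.add_comm] using this
    have hH : hornerR base (d :: ds) = hornerR base ds * base + d := rfl
    have hn : r + hornerR base (d :: ds) = (r + d) + hornerR base ds * base := by rw [hH]; ring
    have hmod : PySem.Int.mod (r + hornerR base (d :: ds)) base = PySem.Int.mod (r + d) base := by
      rw [hn]; simp [PySem.Int.mod, Int.add_mul_fmod_self_right]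
    have hdiv : PySem.Int.floordiv (r + hornerR base (d :: ds)) base
        = PySem.Int.floordiv (r + d) base + hornerR base ds := by
      rw [hn]; simp [PySem.Int.floordiv, Int.add_mul_fdiv_right _ _ hb]
    show carryLoopA large_num base (ds.length + 1 + g) magnitude r = _
    have hfuel : ds.length + 1 + g = (ds.length + g) + 1 := by omega
    rw [hfuel]
    simp only [carryLoopA, hlt, if_pos, hget, or_true]
    rw [ih (magnitude + 1) (PySem.Int.floordiv (r + d) base) hdrop' (by simp at hlen ⊢; omega)]
    simp only [extractB, hdiv, hmod]
    cases hfb : extractB base ds (PySem.Int.floordiv (r + d) base + hornerR base ds) with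
    | mk rest rf => simp

-- ===== VERDICT (by name: the statement is the Claim_ definition above) =====
theorem carry_values_py_spec : Claim_equal_carry_values_py := by
  intro large_num base _ hpre
  unfold Spec_carry_values_py carry_values_py carry_values_py_alt
  cases hnil : large_num with
  | nil => simp [carryLoopA, carryTailB, extractB, hornerB]
  | cons x xs =>
    rw [← hnil]
    have hb : base ≠ 0 := hpre.1 (by rw [hnil]; simp)
    have hfuel : 2 * large_num.length + 64 = large_num.length + (large_num.length + 64) := by omega
    rw [hfuel]
    have := carryLoopA_main large_num base hb (large_num.length + 64) large_num 0 0 (by simp) (by simp)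
    rw [this, hornerB_eq]
    simp
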